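-- pv_equiv track=rewrite | github.com/Checkmk/checkmk | cmk/gui/plugins/wato/utils/__init__.py | _current_tag_setting
-- ===== SOURCE A (Python) =====
-- from typing import Any, Callable, cast, ContextManager, Dict, List, Mapping
-- from typing import Optional as _Optional
-- from typing import Sequence
--
-- def _current_tag_setting(
--     choices: Sequence[tuple[_Optional[str], str]], tag_specs: Sequence[str]
-- ) -> tuple[Any, str]:
--     """Determine current (default) setting of tag by looking into tag_specs (e.g. [ "snmp", "!tcp", "test" ] )"""
--     default_tag = None
--     ignore = True
--     for t in tag_specs:
--         if t[0] == "!":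
--             n = True
--             t = t[1:]
--         else:
--             n = False
--         if t in [x[0] for x in choices]:
--             default_tag = t
--             ignore = False
--             negate = n
--     if ignore:
--         deflt = "ignore"
--     elif negate:
--         deflt = "isnot"
--     else:
--         deflt = "is"
--     return default_tag, deflt
-- ===== SOURCE B (Python) =====
-- def _current_tag_setting(choices, tag_specs):
--     """Determine current (default) setting of tag by looking into tag_specs (e.g. [ "snmp", "!tcp", "test" ] )"""
--     keys = {x[0] for x in choices}
--     for t in reversed(tag_specs):
--         key = t[1:] if t.startswith("!") else t
--         if key in keys:
--             return key, "isnot" if t.startswith("!") else "is"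
--     return None, "ignore"
-- ===== Notes on version B (the rewrite author's own statement) =====
-- stated objective: faster
-- what changed: Replaces A's stateful overwriting forward loop (default_tag/ignore/negate mutated on every match, verdict decided afterwards) by a reversed early-exit scan over a precomputed set of choice keys that returns at the first (i.e. last-in-order) matching spec.
import Mathlib
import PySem

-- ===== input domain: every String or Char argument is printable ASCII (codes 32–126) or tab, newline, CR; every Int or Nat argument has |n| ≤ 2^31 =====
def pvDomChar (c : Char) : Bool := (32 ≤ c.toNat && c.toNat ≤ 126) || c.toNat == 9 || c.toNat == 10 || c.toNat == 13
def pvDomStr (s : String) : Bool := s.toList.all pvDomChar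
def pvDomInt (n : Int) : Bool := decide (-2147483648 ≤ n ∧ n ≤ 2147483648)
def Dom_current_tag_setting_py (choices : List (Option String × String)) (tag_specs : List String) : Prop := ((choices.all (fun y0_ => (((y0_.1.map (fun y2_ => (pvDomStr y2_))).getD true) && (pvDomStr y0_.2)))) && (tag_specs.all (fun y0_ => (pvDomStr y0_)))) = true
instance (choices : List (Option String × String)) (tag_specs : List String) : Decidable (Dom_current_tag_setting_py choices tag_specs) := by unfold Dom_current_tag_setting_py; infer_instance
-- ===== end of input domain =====

-- B replaces A's stateful overwriting forward loop by a reversed early-exit scan over a precomputed set of choice keys (simpler).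


-- ===== PORT A =====
-- literal port of A's loop: state (default_tag, ignore, negate); the `none` branch of
-- pyGet? is where Python raises IndexError (t = ""), excluded by Pre_.
def current_tag_setting_py (choices : List (Option String × String)) (tag_specs : List String) : Option String × String :=
  let st := tag_specs.foldl (fun s t =>
    let nt : Bool × String :=
      match PySem.Str.pyGet? t 0 with
      | some c => if c = '!' then (true, PySem.Str.slice t (some 1) none) else (false, t)
      | none => (false, t)  -- Python raises IndexError here (t = ""); outside Pre_
    if (choices.map (fun x => x.1)).contains (some nt.2) then (some nt.2, false, nt.1) else s)
    ((none, true, false) : Option String × Bool × Bool)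
  if st.2.1 then (st.1, "ignore")
  else if st.2.2 then (st.1, "isnot")
  else (st.1, "is")

-- ===== PORT B =====
-- literal port of Source B: reversed early-exit scan; ctsScan is Source B's for-loop with its returns
def ctsScan (keys : PySem.Set (Option String)) : List String → Option String × String
  | [] => (none, "ignore")
  | t :: rest =>
      let key := if PySem.Str.startswith t "!" then PySem.Str.slice t (some 1) none else t
      if PySem.Set.contains keys (some key) then
        (some key, if PySem.Str.startswith t "!" then "isnot" else "is")
      else ctsScan keys rest

def current_tag_setting_py_alt (choices : List (Option String × String)) (tag_specs : List String) : Option String × String :=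
  ctsScan (PySem.Set.ofList (choices.map (fun x => x.1))) tag_specs.reverse

-- ===== PRECONDITION & SPEC =====
-- Pre_ excludes exactly the inputs where A raises IndexError: an empty string in tag_specs.
def Pre_current_tag_setting_py (choices : List (Option String × String)) (tag_specs : List String) : Prop := ∀ t ∈ tag_specs, t ≠ ""
instance (choices : List (Option String × String)) (tag_specs : List String) : Decidable (Pre_current_tag_setting_py choices tag_specs) := by unfold Pre_current_tag_setting_py; infer_instance
def pvWitness_current_tag_setting_py : (List (Option String × String)) × List String := ([(some "snmp", "SNMP"), (none, "none")], ["snmp", "!tcp", "test"])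

def Spec_current_tag_setting_py (choices : List (Option String × String)) (tag_specs : List String) (out : Option String × String) : Prop := out = current_tag_setting_py_alt choices tag_specs
instance (choices : List (Option String × String)) (tag_specs : List String) (out : Option String × String) : Decidable (Spec_current_tag_setting_py choices tag_specs out) := by unfold Spec_current_tag_setting_py; infer_instance

-- ===== CLAIM (what is proved, stated in full; the proofs are below) =====
def Claim_equal_current_tag_setting_py : Prop := ∀ (choices : List (Option String × String)) (tag_specs : List String), Dom_current_tag_setting_py choices tag_specs → Pre_current_tag_setting_py choices tag_specs → Spec_current_tag_setting_py choices tag_specs (current_tag_setting_py choices tag_specs)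

-- ===== LEMMAS AND PROOFS =====

-- both membership tests agree: list containment = set containment on the deduplicated keys
theorem cts_mem_eq (l : List (Option String)) (x : Option String) :
    l.contains x = PySem.Set.contains (PySem.Set.ofList l) x := by
  simp only [PySem.Set.contains_eq_listContains]
  rw [Bool.eq_iff_iff]
  simp [PySem.Set.mem_ofList]

-- on a nonempty string, startswith "!" is exactly A's first-character test
theorem cts_bang_eq (t : String) (ht : t ≠ "") :
    PySem.Str.startswith t "!" =
      (match PySem.Str.pyGet? t 0 with
       | some c => decide (c = '!')
       | none => false) := by
  have hne : t.toList ≠ [] := by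
    intro hn
    apply ht
    have := congrArg String.ofList hn
    simpa using this
  cases hl : t.toList with
  | nil => exact absurd hl hne
  | cons c cs =>
    have hg : PySem.Str.pyGet? t 0 = some c := by
      simp [hl]
    rw [PySem.Str.startswith_eq, show ("!" : String).toList = ['!'] from rfl, hl, hg]
    by_cases hc : c = '!'
    · simp [PySem.Chars.startswith, List.isPrefixOf, hc]
    · have hc' : ¬('!' = c) := fun h => hc h.symm
      simp [PySem.Chars.startswith, List.isPrefixOf, hc, hc']

-- both programs strip the same key off a nonempty spec
theorem cts_key_eq (t : String) (ht : t ≠ "") :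
    (if PySem.Str.startswith t "!" then PySem.Str.slice t (some 1) none else t)
      = (match PySem.Str.pyGet? t 0 with
         | some c => if c = '!' then (true, PySem.Str.slice t (some 1) none) else (false, t)
         | none => (false, t) : Bool × String).2 := by
  rw [cts_bang_eq t ht]
  cases PySem.Str.pyGet? t 0 with
  | none => simp
  | some c => by_cases hc : c = '!' <;> simp [hc]

-- A's forward fold, finalized, equals B's reversed early-exit scan
theorem cts_main (choices : List (Option String × String)) (l : List String)
    (h : ∀ t ∈ l, t ≠ "") :
    (let st := l.foldl (fun s t =>
        let nt : Bool × String :=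
          match PySem.Str.pyGet? t 0 with
          | some c => if c = '!' then (true, PySem.Str.slice t (some 1) none) else (false, t)
          | none => (false, t)
        if (choices.map (fun x => x.1)).contains (some nt.2) then (some nt.2, false, nt.1) else s)
      ((none, true, false) : Option String × Bool × Bool)
     if st.2.1 then (st.1, "ignore")
     else if st.2.2 then (st.1, "isnot")
     else (st.1, "is"))
    = ctsScan (PySem.Set.ofList (choices.map (fun x => x.1))) l.reverse := by
  induction l using List.reverseRecOn with
  | nil => simp [ctsScan]
  | append_singleton l t ih =>
    have ht : t ≠ "" := h t (by simp)
    have hl : ∀ u ∈ l, u ≠ "" := fun u hu => h u (by simp [hu])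
    have hmem := cts_mem_eq (choices.map (fun x => x.1))
    have hkey := cts_key_eq t ht
    have hbang := cts_bang_eq t ht
    simp only [List.foldl_append, List.foldl_cons, List.foldl_nil, List.reverse_append,
      List.reverse_cons, List.reverse_nil, List.nil_append, List.cons_append, ctsScan]
    rw [hkey, hmem]
    by_cases hc : PySem.Set.contains (PySem.Set.ofList (choices.map (fun x => x.1)))
        (some ((match PySem.Str.pyGet? t 0 with
          | some c => if c = '!' then (true, PySem.Str.slice t (some 1) none) else (false, t)
          | none => (false, t) : Bool × String).2)) = true
    · rw [if_pos hc, if_pos hc]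
      rw [hkey] at *
      rw [hbang]
      cases hg : PySem.Str.pyGet? t 0 with
      | none => simp
      | some c => by_cases hcc : c = '!' <;> simp [hcc]
    · rw [if_neg hc, if_neg hc]
      exact ih hl

-- ===== VERDICT (by name: the statement is the Claim_ definition above) =====
theorem current_tag_setting_py_spec : Claim_equal_current_tag_setting_py := by
  intro choices tag_specs _ hpre
  unfold Spec_current_tag_setting_py current_tag_setting_py current_tag_setting_py_alt
  exact cts_main choices tag_specs hpre
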